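-- pv_equiv track=rewrite | github.com/sjpkorea/xython.github.io | xython/pynal.py | make_time_list_by_step
-- ===== SOURCE A (Python) =====
-- def make_time_list_by_step(start_hsm_list, step = 30, cycle = 20):
-- 	"""
--
-- 	:param start_hsm_list:
-- 	:param step:
-- 	:param cycle:
-- 	:return:
-- 	시작과 종료시간을 입력하면, 30분간격으로 시간목록을 자동으로 생성시키는것
-- 	"""
-- 	result = []
-- 	hour, min, sec = start_hsm_list
-- 	result.append([hour, min, sec])
-- 	for one in range(cycle):
-- 		min = min + step
-- 		over_min, min = divmod(min, 60)
-- 		if over_min > 0: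
-- 			hour = hour + over_min
-- 		hour = divmod(hour, 24)[1]
-- 		result.append([hour, min, sec])
-- 	return result
-- ===== SOURCE B (Python) =====
-- def make_time_list_by_step(start_hsm_list, step = 30, cycle = 20):
-- 	hour, min0, sec = start_hsm_list
-- 	result = [[hour, min0, sec]]
-- 	for i in range(1, cycle + 1):
-- 		total = min0 + step * i
-- 		result.append([(hour + total // 60) % 24, total % 60, sec])
-- 	return result
-- ===== Notes on version B (the rewrite author's own statement) =====
-- stated objective: simpler
-- what changed: B replaces A's mutable hour/min recurrence (divmod carry propagated across iterations) by a closed-form per-index computation: row i is derived directly as [(hour + (min0+step*i)//60) % 24, (min0+step*i) % 60, sec].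
-- intended difference: On inputs where some iteration's minute carry is negative (step or minutes crossing an hour boundary downwards), A ignores the negative carry and leaves the hour unchanged while still reducing the minutes, producing an inconsistent time; B moves the hour backwards (mod 24), which is the intended clock arithmetic. — e.g. on make_time_list_by_step([0, 0, 0], -30, 1): A returns [[0, 0, 0], [0, 30, 0]], B returns [[0, 0, 0], [23, 30, 0]]
import Mathlib
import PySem

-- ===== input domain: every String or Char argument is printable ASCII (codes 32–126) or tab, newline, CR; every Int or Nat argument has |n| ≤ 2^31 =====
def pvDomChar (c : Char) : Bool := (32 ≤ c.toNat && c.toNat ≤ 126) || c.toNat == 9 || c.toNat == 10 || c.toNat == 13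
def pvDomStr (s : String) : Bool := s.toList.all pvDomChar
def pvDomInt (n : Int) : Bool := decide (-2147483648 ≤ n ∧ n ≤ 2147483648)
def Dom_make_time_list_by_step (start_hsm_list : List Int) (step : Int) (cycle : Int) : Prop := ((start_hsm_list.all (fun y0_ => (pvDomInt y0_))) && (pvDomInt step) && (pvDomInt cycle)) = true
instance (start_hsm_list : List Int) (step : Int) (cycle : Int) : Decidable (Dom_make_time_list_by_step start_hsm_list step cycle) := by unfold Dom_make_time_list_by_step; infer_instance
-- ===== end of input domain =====

-- B derives each row directly from its index (closed form) instead of carrying mutable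
-- hour/min state; on inputs where a minute carry goes negative A ignores the carry
-- (hour left unchanged) while B moves the hour backwards as intended (see D_ below).

-- ===== PORT A =====
-- one loop iteration of A: state = (result, hour, min)
def pvAstep (step sec : Int) (st : List (List Int) × Int × Int) (_one : Int) : List (List Int) × Int × Int :=
  let result := st.1
  let hour := st.2.1
  let min := st.2.2
  let min1 := min + step
  let over_min := PySem.Int.floordiv min1 60
  let min2 := PySem.Int.mod min1 60
  let hour1 := if over_min > 0 then hour + over_min else hour
  let hour2 := PySem.Int.mod hour1 24
  (result ++ [[hour2, min2, sec]], hour2, min2)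

def make_time_list_by_step (start_hsm_list : List Int) (step : Int) (cycle : Int) : List (List Int) :=
  match start_hsm_list with
  | [hour, min, sec] =>
      (((PySem.List.pyRange 0 cycle 1).foldl (pvAstep step sec) ([[hour, min, sec]], hour, min))).1
  | _ => []  -- unpacking raises ValueError in Python; excluded by Pre_

-- ===== PORT B =====
-- row i of B, computed from the index alone
def pvBrow (hour min0 sec step i : Int) : List Int :=
  let total := min0 + step * i
  [PySem.Int.mod (hour + PySem.Int.floordiv total 60) 24, PySem.Int.mod total 60, sec]

def make_time_list_by_step_alt (start_hsm_list : List Int) (step : Int) (cycle : Int) : List (List Int) :=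
  if start_hsm_list.length = 3 then
    let hour := start_hsm_list.getD 0 0
    let min0 := start_hsm_list.getD 1 0
    let sec := start_hsm_list.getD 2 0
    (PySem.List.pyRange 1 (cycle + 1) 1).foldl
      (fun acc i => acc ++ [pvBrow hour min0 sec step i]) [[hour, min0, sec]]
  else []  -- unpacking raises ValueError in Python; excluded by Pre_

-- ===== PRECONDITION & SPEC =====
-- Pre_ excludes only the lists that are not triples, on which Python A raises ValueError.
def Pre_make_time_list_by_step (start_hsm_list : List Int) (step : Int) (cycle : Int) : Prop :=
  start_hsm_list.length = 3
instance (start_hsm_list : List Int) (step : Int) (cycle : Int) : Decidable (Pre_make_time_list_by_step start_hsm_list step cycle) := by unfold Pre_make_time_list_by_step; infer_instance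

def pvWitness_make_time_list_by_step : List Int × Int × Int := ([8, 30, 0], 30, 20)

-- When some iteration's minute carry is negative (so the start minutes plus the accumulated
-- step cross an hour boundary downwards), A ignores the negative carry and leaves the hour
-- unchanged while still reducing the minutes; B moves the hour backwards (mod 24), the
-- intended clock arithmetic.  (k ranges over one 1440-step period, after which the carry
-- pattern repeats mod 24; for 0 ≤ step only the very first carry can be negative.)
def D_make_time_list_by_step (start_hsm_list : List Int) (step : Int) (cycle : Int) : Prop :=
  ∃ k < (cycle ⊓ 1440).toNat,
    ¬ 24 ∣ (start_hsm_list.getD 1 0 + step + (step ⊓ 0) * k) / 60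
        - (start_hsm_list.getD 1 0 + step) / 60 ⊔ 0
instance (start_hsm_list : List Int) (step : Int) (cycle : Int) : Decidable (D_make_time_list_by_step start_hsm_list step cycle) := by unfold D_make_time_list_by_step; infer_instance

def Spec_make_time_list_by_step (start_hsm_list : List Int) (step : Int) (cycle : Int) (out : List (List Int)) : Prop := ¬ D_make_time_list_by_step start_hsm_list step cycle → out = make_time_list_by_step_alt start_hsm_list step cycle
instance (start_hsm_list : List Int) (step : Int) (cycle : Int) (out : List (List Int)) : Decidable (Spec_make_time_list_by_step start_hsm_list step cycle out) := by unfold Spec_make_time_list_by_step; infer_instance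

def pvDiffWitness_make_time_list_by_step : List Int × Int × Int := ([0, 0, 0], -30, 1)
def pvDiffWitnessOut_make_time_list_by_step : (List (List Int)) × (List (List Int)) :=
  ([[0, 0, 0], [0, 30, 0]], [[0, 0, 0], [23, 30, 0]])

-- ===== CLAIM (what is proved, stated in full; the proofs are below) =====
def Claim_unchanged_make_time_list_by_step : Prop := ∀ (start_hsm_list : List Int) (step : Int) (cycle : Int), Dom_make_time_list_by_step start_hsm_list step cycle → Pre_make_time_list_by_step start_hsm_list step cycle → Spec_make_time_list_by_step start_hsm_list step cycle (make_time_list_by_step start_hsm_list step cycle)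
def Claim_changed_make_time_list_by_step : Prop := Dom_make_time_list_by_step (pvDiffWitness_make_time_list_by_step.1) (pvDiffWitness_make_time_list_by_step.2.1) (pvDiffWitness_make_time_list_by_step.2.2) ∧ Pre_make_time_list_by_step (pvDiffWitness_make_time_list_by_step.1) (pvDiffWitness_make_time_list_by_step.2.1) (pvDiffWitness_make_time_list_by_step.2.2) ∧ D_make_time_list_by_step (pvDiffWitness_make_time_list_by_step.1) (pvDiffWitness_make_time_list_by_step.2.1) (pvDiffWitness_make_time_list_by_step.2.2) ∧ make_time_list_by_step (pvDiffWitness_make_time_list_by_step.1) (pvDiffWitness_make_time_list_by_step.2.1) (pvDiffWitness_make_time_list_by_step.2.2) = pvDiffWitnessOut_make_time_list_by_step.1 ∧ make_time_list_by_step_alt (pvDiffWitness_make_time_list_by_step.1) (pvDiffWitness_make_time_list_by_step.2.1) (pvDiffWitness_make_time_list_by_step.2.2) = pvDiffWitnessOut_make_time_list_by_step.2 ∧ pvDiffWitnessOut_make_time_list_by_step.1 ≠ pvDiffWitnessOut_make_time_list_by_step.2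
def Claim_exact_make_time_list_by_step : Prop := ∀ (start_hsm_list : List Int) (step : Int) (cycle : Int), Dom_make_time_list_by_step start_hsm_list step cycle → Pre_make_time_list_by_step start_hsm_list step cycle → D_make_time_list_by_step start_hsm_list step cycle → make_time_list_by_step start_hsm_list step cycle ≠ make_time_list_by_step_alt start_hsm_list step cycle

-- ===== LEMMAS AND PROOFS =====

-- (m + step*k) // 60 : the cumulative minute floor after k steps (B's carry at index k)
def pvF (m step k : Int) : Int := (m + step * k) / 60

-- the minute carry A's loop computes at iteration j (0-based; the first one is taken
-- from the raw, unreduced minutes)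
def pvOver (m step : Int) : Nat → Int
  | 0 => pvF m step 1
  | (n + 1) => pvF m step ((n : Int) + 2) - pvF m step ((n : Int) + 1)

-- the total amount A actually adds to the hour in the first n iterations
-- (negative carries are skipped by A's `if over_min > 0`)
def pvS (m step : Int) : Nat → Int
  | 0 => 0
  | (n + 1) => pvS m step n + max (pvOver m step n) 0

-- monotonicity of k ↦ pvF m step k for step ≤ 0 (antitone)
theorem pv_F_antitone (m step : Int) (hstep : step ≤ 0) {i j : Int} (hij : i ≤ j) :
    pvF m step j ≤ pvF m step i := by
  unfold pvF
  apply Int.ediv_le_ediv (by norm_num)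
  have := mul_le_mul_of_nonpos_left hij hstep
  omega

-- monotonicity of k ↦ pvF m step k for 0 ≤ step
theorem pv_F_monotone (m step : Int) (hstep : 0 ≤ step) {i j : Int} (hij : i ≤ j) :
    pvF m step i ≤ pvF m step j := by
  unfold pvF
  apply Int.ediv_le_ediv (by norm_num)
  have := mul_le_mul_of_nonneg_left hij hstep
  omega

theorem pv_over_succ (m step : Int) (n : Nat) (hn : 1 ≤ n) :
    pvOver m step n = pvF m step ((n : Int) + 1) - pvF m step (n : Int) := by
  match n, hn with
  | (j + 1), _ => simp [pvOver]; ring_nf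

-- A's row k (1-based): the hour carries only the positive overflows
-- general loop invariant for A: after n ≥ 1 iterations the state is determined by pvS/pvF
theorem pv_loopA (h m s step : Int) :
    ∀ n : Nat, 1 ≤ n →
      (List.range n).foldl (fun st (k : Nat) => pvAstep step s st ((0 : Int) + k))
          ([[h, m, s]], h, m) =
        ([[h, m, s]] ++ (List.range n).map
            (fun k : Nat => [(h + pvS m step (k + 1)) % 24, (m + step * ((k : Int) + 1)) % 60, s]),
          (h + pvS m step n) % 24,
          (m + step * (n : Int)) % 60) := by
  intro n
  induction n with
  | zero => intro h1; omega
  | succ n ih =>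
    intro _
    rcases Nat.eq_zero_or_pos n with hn0 | hn1
    · subst hn0
      have hS1 : pvS m step 1 = max ((m + step) / 60) 0 := by
        simp [pvS, pvOver, pvF]
      simp only [List.range_one, List.foldl_cons, List.foldl_nil, List.map_cons, List.map_nil,
        pvAstep,
        PySem.Int.floordiv_eq_ediv_of_pos (by norm_num : (0:Int) < 60),
        PySem.Int.mod_eq_emod_of_pos (by norm_num : (0:Int) < 60),
        PySem.Int.mod_eq_emod_of_pos (by norm_num : (0:Int) < 24)]
      norm_num
      rw [hS1]
      split_ifs with hp
      · have e : max ((m + step) / 60) 0 = (m + step) / 60 := by omega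
        rw [e]
      · have e : max ((m + step) / 60) 0 = 0 := by omega
        rw [e]; simp
    · have hstate := ih hn1
      rw [List.range_succ, List.foldl_append, hstate]
      simp only [List.foldl_cons, List.foldl_nil]
      have hover : PySem.Int.floordiv ((m + step * (n : Int)) % 60 + step) 60
          = pvF m step ((n : Int) + 1) - pvF m step (n : Int) := by
        rw [PySem.Int.floordiv_eq_ediv_of_pos (by norm_num : (0:Int) < 60)]
        unfold pvF
        have e : m + step * ((n : Int) + 1) = (m + step * (n : Int)) + step := by ring
        rw [e]
        omega
      have hoverS : pvF m step ((n : Int) + 1) - pvF m step (n : Int) = pvOver m step n := by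
        rw [pv_over_succ m step n hn1]
      have hSsucc : pvS m step (n + 1) = pvS m step n + max (pvOver m step n) 0 := rfl
      simp only [pvAstep, hover, hoverS]
      have hmin : PySem.Int.mod ((m + step * (n : Int)) % 60 + step) 60
          = (m + step * ((n : Int) + 1)) % 60 := by
        rw [PySem.Int.mod_eq_emod_of_pos (by norm_num : (0:Int) < 60)]
        have e : m + step * ((n : Int) + 1) = (m + step * (n : Int)) + step := by ring
        rw [e]
        omega
      have hhour :
          PySem.Int.mod
            (if pvOver m step n > 0 then
              (h + pvS m step n) % 24 + pvOver m step n
             else (h + pvS m step n) % 24) 24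
          = (h + pvS m step (n + 1)) % 24 := by
        rw [PySem.Int.mod_eq_emod_of_pos (by norm_num : (0:Int) < 24), hSsucc]
        by_cases hpos : pvOver m step n > 0
        · rw [if_pos hpos]
          have : max (pvOver m step n) 0 = pvOver m step n := by omega
          rw [this]; omega
        · rw [if_neg hpos]
          have : max (pvOver m step n) 0 = 0 := by omega
          rw [this]; omega
      refine Prod.ext ?_ (Prod.ext ?_ ?_)
      · simp only [List.range_succ, List.map_append, List.map_cons, List.map_nil,
          List.append_assoc]
        congr 2
        simp only [hmin, hhour]
      · simpa using hhour
      · push_cast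
        simpa using hmin

-- with a non-negative step only the first carry can be negative: A's added total is closed form
theorem pv_S_of_nonneg (m step : Int) (hstep : 0 ≤ step) :
    ∀ n : Nat, 1 ≤ n → pvS m step n = pvF m step (n : Int) - min (pvF m step 1) 0 := by
  intro n
  induction n with
  | zero => intro h1; omega
  | succ n ih =>
    intro _
    rcases Nat.eq_zero_or_pos n with hn0 | hn1
    · subst hn0
      simp [pvS, pvOver]
      omega
    · have hmono : pvF m step (n : Int) ≤ pvF m step ((n : Int) + 1) :=
        pv_F_monotone m step hstep (by omega)
      have : pvS m step (n + 1) = pvS m step n + max (pvOver m step n) 0 := rfl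
      rw [this, ih hn1, pv_over_succ m step n hn1]
      push_cast
      omega

-- with a negative step every later carry is non-positive: A adds only the first (if positive)
theorem pv_S_of_neg (m step : Int) (hstep : step < 0) :
    ∀ n : Nat, 1 ≤ n → pvS m step n = max (pvF m step 1) 0 := by
  intro n
  induction n with
  | zero => intro h1; omega
  | succ n ih =>
    intro _
    rcases Nat.eq_zero_or_pos n with hn0 | hn1
    · subst hn0
      simp [pvS, pvOver]
    · have hmono : pvF m step ((n : Int) + 1) ≤ pvF m step (n : Int) :=
        pv_F_antitone m step (by omega) (by omega)
      have : pvS m step (n + 1) = pvS m step n + max (pvOver m step n) 0 := rfl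
      rw [this, ih hn1, pv_over_succ m step n hn1]
      omega

-- both outputs, for cycle ≥ 1, as explicit row maps over the same range
theorem pv_outputs (h m s step cycle : Int) (hc1 : 1 ≤ cycle) :
    make_time_list_by_step [h, m, s] step cycle
        = [[h, m, s]] ++ (List.range cycle.toNat).map
            (fun k : Nat => [(h + pvS m step (k + 1)) % 24, (m + step * ((k : Int) + 1)) % 60, s]) ∧
      make_time_list_by_step_alt [h, m, s] step cycle
        = [[h, m, s]] ++ (List.range cycle.toNat).map
            (fun k : Nat => [(h + pvF m step ((k : Int) + 1)) % 24, (m + step * ((k : Int) + 1)) % 60, s]) := by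
  have hr1 := PySem.List.pyRange_one 0 cycle
  have hr2 := PySem.List.pyRange_one 1 (cycle + 1)
  have hn1 : (cycle - 0).toNat = cycle.toNat := by omega
  have hn2 : (cycle + 1 - 1).toNat = cycle.toNat := by omega
  constructor
  · simp only [make_time_list_by_step]
    rw [hr1, hn1]
    have hfold : ((List.range cycle.toNat).map (fun k : Nat => (0 : Int) + k)).foldl
        (pvAstep step s) ([[h, m, s]], h, m)
        = (List.range cycle.toNat).foldl
            (fun st (k : Nat) => pvAstep step s st ((0 : Int) + k)) ([[h, m, s]], h, m) := by
      rw [List.foldl_map]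
    rw [hfold, pv_loopA h m s step cycle.toNat (by omega)]
  · simp only [make_time_list_by_step_alt, List.length_cons, List.length_nil,
      List.getD_cons_zero, List.getD_cons_succ, if_pos]
    rw [hr2, hn2]
    have hfold : ((List.range cycle.toNat).map (fun k : Nat => (1 : Int) + k)).foldl
        (fun acc i => acc ++ [pvBrow h m s step i]) [[h, m, s]]
        = (List.range cycle.toNat).foldl
            (fun acc (k : Nat) => acc ++ [pvBrow h m s step (1 + k)]) [[h, m, s]] := by
      rw [List.foldl_map]
    rw [hfold]
    have hfold2 : ∀ (l : List Nat) (a : List (List Int)),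
        l.foldl (fun acc (k : Nat) => acc ++ [pvBrow h m s step (1 + k)]) a
          = a ++ l.map (fun k : Nat => pvBrow h m s step (1 + k)) := by
      intro l
      induction l with
      | nil => simp
      | cons x xs ih => intro a; simp [List.foldl_cons, ih]
    rw [hfold2]
    congr 1
    apply List.map_congr_left
    intro k _
    simp only [pvBrow, pvF,
      PySem.Int.mod_eq_emod_of_pos (by norm_num : (0:Int) < 24),
      PySem.Int.mod_eq_emod_of_pos (by norm_num : (0:Int) < 60),
      PySem.Int.floordiv_eq_ediv_of_pos (by norm_num : (0:Int) < 60)]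
    have e : (1:Int) + (k:Int) = (k:Int) + 1 := by ring
    rw [e]

-- (x + 60c)/60 = x/60 + c : the carry pattern repeats exactly every 1440 steps
theorem pv_period (x c : Int) : (x + 60 * c) / 60 = x / 60 + c := by omega

-- rewriting D_ on a triple: resolves the getD lookups, splits on the sign of step and
-- removes the 1440-period cap
-- on Int the lattice operations are min/max (definitionally)
theorem pv_inf (a b : Int) : a ⊓ b = min a b := rfl
theorem pv_sup (a b : Int) : a ⊔ b = max a b := rfl

theorem pv_D_iff (h m s step cycle : Int) :
    D_make_time_list_by_step [h, m, s] step cycle ↔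
      (1 ≤ cycle ∧ ∃ k ∈ List.range cycle.toNat,
        ¬ ((24:Int) ∣ (if 0 ≤ step then min (pvF m step 1) 0
            else pvF m step ((k : Int) + 1) - max (pvF m step 1) 0))) := by
  unfold D_make_time_list_by_step
  simp only [List.getD_cons_succ, List.getD_cons_zero, List.mem_range, pv_inf, pv_sup]
  constructor
  · rintro ⟨k, hk, hd⟩
    have hc : 1 ≤ cycle := by omega
    refine ⟨hc, ?_⟩
    by_cases hs : 0 ≤ step
    · rw [min_eq_right hs] at hd
      refine ⟨0, by omega, ?_⟩
      rw [if_pos hs]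
      intro hx
      apply hd
      unfold pvF at hx
      omega
    · push_neg at hs
      rw [min_eq_left hs.le] at hd
      refine ⟨k, by omega, ?_⟩
      rw [if_neg (by omega)]
      intro hx
      apply hd
      unfold pvF at hx
      have e : m + step * ((k : Int) + 1) = m + step + step * (k : Int) := by ring
      rw [e] at hx
      omega
  · rintro ⟨hc, k, hk, hd⟩
    by_cases hs : 0 ≤ step
    · rw [if_pos hs] at hd
      refine ⟨0, by omega, ?_⟩
      rw [min_eq_right hs]
      intro hx
      apply hd
      unfold pvF
      omega
    · push_neg at hs
      rw [if_neg (by omega)] at hd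
      unfold pvF at hd
      rcases (by omega : (k : Int) < 1440 ∨ 1440 ≤ (k : Int)) with hk14 | hk14
      · refine ⟨k, by omega, ?_⟩
        rw [min_eq_left hs.le]
        intro hx
        apply hd
        have e : m + step * ((k : Int) + 1) = m + step + step * (k : Int) := by ring
        rw [e]
        omega
      · -- reduce k modulo the 1440-step period
        refine ⟨k % 1440, by omega, ?_⟩
        rw [min_eq_left hs.le]
        intro hx
        apply hd
        have hq : (k : Int) = 1440 * ((k / 1440 : Nat) : Int) + ((k % 1440 : Nat) : Int) := by
          push_cast
          omega
        have hsplit : m + step * ((k : Int) + 1)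
            = (m + step + step * ((k % 1440 : Nat) : Int))
              + 60 * (24 * step * ((k / 1440 : Nat) : Int)) := by
          rw [hq]; ring
        rw [hsplit, pv_period]
        have h24 : (24:Int) ∣ 24 * step * ((k / 1440 : Nat) : Int) :=
          ⟨step * ((k / 1440 : Nat) : Int), by ring⟩
        omega

-- ===== VERDICT (by name: the statement is the Claim_ definition above) =====
theorem make_time_list_by_step_spec : Claim_unchanged_make_time_list_by_step := by
  intro l step cycle _hdom hpre hnd
  match l, hpre with
  | [h, m, s], _ =>
    rcases (by omega : cycle ≤ 0 ∨ 1 ≤ cycle) with hc0 | hc1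
    · simp only [make_time_list_by_step, make_time_list_by_step_alt, List.length_cons,
        List.length_nil, List.getD_cons_zero, List.getD_cons_succ, if_pos]
      have e1 : PySem.List.pyRange 0 cycle 1 = [] := by
        rw [PySem.List.pyRange_one]
        have h0 : (cycle - 0).toNat = 0 := by omega
        rw [h0]; rfl
      have e2 : PySem.List.pyRange 1 (cycle + 1) 1 = [] := by
        rw [PySem.List.pyRange_one]
        have h0 : (cycle + 1 - 1).toNat = 0 := by omega
        rw [h0]; rfl
      simp [e1, e2]
    · obtain ⟨hA, hB⟩ := pv_outputs h m s step cycle hc1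
      rw [hA, hB]
      rw [pv_D_iff] at hnd
      congr 1
      apply List.map_congr_left
      intro k hk
      have hbody : (24:Int) ∣ (if 0 ≤ step then min (pvF m step 1) 0
          else pvF m step ((k : Int) + 1) - max (pvF m step 1) 0) := by
        by_contra hx
        exact hnd ⟨hc1, k, hk, hx⟩
      have hdvd : (24:Int) ∣ (pvS m step (k + 1) - pvF m step ((k : Int) + 1)) := by
        rcases (by omega : 0 ≤ step ∨ step < 0) with hs | hs
        · rw [pv_S_of_nonneg m step hs (k + 1) (by omega)]
          rw [if_pos hs] at hbody
          push_cast
          omega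
        · rw [pv_S_of_neg m step hs (k + 1) (by omega)]
          rw [if_neg (by omega : ¬ 0 ≤ step)] at hbody
          omega
      have hhour : (h + pvS m step (k + 1)) % 24 = (h + pvF m step ((k : Int) + 1)) % 24 := by
        omega
      rw [hhour]

theorem make_time_list_by_step_changed : Claim_changed_make_time_list_by_step := by
  unfold Claim_changed_make_time_list_by_step; decide

theorem make_time_list_by_step_tight : Claim_exact_make_time_list_by_step := by
  intro l step cycle _hdom hpre hd heq
  match l, hpre with
  | [h, m, s], _ =>
    rw [pv_D_iff] at hd
    obtain ⟨hc1, k, hk, hdvd⟩ := hd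
    obtain ⟨hA, hB⟩ := pv_outputs h m s step cycle hc1
    rw [hA, hB] at heq
    have hmap := List.append_cancel_left heq
    rw [List.map_inj_left] at hmap
    have hrow := hmap k hk
    have hh := congrArg (fun t : List Int => t.headD 0) hrow
    simp only [List.headD_cons] at hh
    apply hdvd
    rcases (by omega : 0 ≤ step ∨ step < 0) with hs | hs
    · rw [pv_S_of_nonneg m step hs (k + 1) (by omega)] at hh
      rw [if_pos hs]
      push_cast at hh
      omega
    · rw [pv_S_of_neg m step hs (k + 1) (by omega)] at hh
      rw [if_neg (by omega : ¬ 0 ≤ step)]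
      omega
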